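-- pv_equiv track=rewrite | github.com/saanvi23454/RISCV | EXTRA/useless.py | sext
-- ===== SOURCE A (Python) =====
-- def sext(number, bits):
--   # ONLY USE IT TO SIGN EXTEND AN IMMEDIATE VALUE
--     """
--     This function first converts the number into binary
--     and then extends its bits to the required amount
--     """
--     number = int(number)
--     if ( ( number < -(2**(bits-1)) ) or ( number > (2**(bits-1))-1 ) ):
--         return "e1"
--
--     if (number<0):
--         sign = -1
--         number = -number
--
--     else:
--         sign = 1
--     binary = ""
--
--     while (number>0):
--         binary += f"{number%2}"
--         number = number//2
--     binary = binary[::-1]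
--     binary = ('0'*(bits-len(binary)))+binary
--
--     if (sign == -1):
--         flag=False
--         twosComplement = ""
--
--         for i in range(len(binary)-1, -1, -1):
--             if (flag):
--                 if binary[i]=='1':
--                     twosComplement+='0'
--                 else:
--                     twosComplement+='1'
--                 continue
--
--             twosComplement+=binary[i]
--             if (binary[i]=='1'):
--                 flag = True
--
--         binary = twosComplement[::-1]
--     return binary
-- ===== SOURCE B (Python) =====
-- def sext(number, bits):
--     # Same range check as A (bits < 1 is what A's float-power check amounts to),
--     # then one mask/format step instead of magnitude digits + bit-flip loops.
--     number = int(number)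
--     if bits < 1 or number < -(1 << (bits - 1)) or number > (1 << (bits - 1)) - 1:
--         return "e1"
--     return format(number % (1 << bits), '0{}b'.format(bits))
-- ===== Notes on version B (the rewrite author's own statement) =====
-- stated objective: idiomatic
-- what changed: Replaces the sign/magnitude while-loop plus two's-complement bit-flip scan with a single modular reduction (number % 2**bits) formatted as a zero-padded binary string.
import Mathlib
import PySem

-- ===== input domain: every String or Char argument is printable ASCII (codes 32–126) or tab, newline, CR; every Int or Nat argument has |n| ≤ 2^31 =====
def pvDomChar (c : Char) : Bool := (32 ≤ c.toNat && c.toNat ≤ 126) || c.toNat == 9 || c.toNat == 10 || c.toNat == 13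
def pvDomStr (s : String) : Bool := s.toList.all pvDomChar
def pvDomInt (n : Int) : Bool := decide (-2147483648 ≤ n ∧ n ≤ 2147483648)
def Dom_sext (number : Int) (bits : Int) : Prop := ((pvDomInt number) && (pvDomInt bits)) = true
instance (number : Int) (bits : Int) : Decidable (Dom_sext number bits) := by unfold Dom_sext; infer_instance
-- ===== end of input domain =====

-- B replaces A's sign/magnitude digit loop + two's-complement bit-flip scan by one
-- modular reduction (number % 2**bits) formatted as a zero-padded binary string.

-- ===== PORT A =====
-- the while loop: binary += f"{number%2}"; number = number//2   (digits appended LSB-first)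
def sextDigits (n : Nat) (acc : List Char) : List Char :=
  if n = 0 then acc
  else sextDigits (n / 2) (acc ++ [if n % 2 = 1 then '1' else '0'])

-- the for loop over range(len(binary)-1,-1,-1), i.e. over binary.reverse, building twosComplement by +=
def tcLoop : List Char → Bool → List Char → List Char
  | [], _, acc => acc
  | c :: rest, flag, acc =>
    if flag then tcLoop rest flag (acc ++ [if c = '1' then '0' else '1'])
    else tcLoop rest (c = '1') (acc ++ [c])

def sext (number : Int) (bits : Int) : String :=
  -- for bits < 1, Python's 2**(bits-1) is a float in [0.0, 0.5]; the range check is then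
  -- true for every integer (hand-ported float semantics; exact on all Int inputs)
  if bits < 1 then "e1"
  else if number < -(2 ^ (bits - 1).toNat) ∨ number > 2 ^ (bits - 1).toNat - 1 then "e1"
  else
    let sign : Int := if number < 0 then -1 else 1
    let n : Nat := if number < 0 then (-number).toNat else number.toNat
    let binary : List Char := (sextDigits n []).reverse
    let binary : List Char := List.replicate (bits - (binary.length : Int)).toNat '0' ++ binary
    if sign = -1 then String.mk (tcLoop binary.reverse false []).reverse
    else String.mk binary

-- ===== PORT B =====
-- format(v, 'b') : binary digits of a nonnegative integer, MSB first ('0' for 0)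
def bfmt (n : Nat) : List Char :=
  if n < 2 then [if n = 1 then '1' else '0']
  else bfmt (n / 2) ++ [if n % 2 = 1 then '1' else '0']

def sext_alt (number : Int) (bits : Int) : String :=
  if bits < 1 ∨ number < -(2 ^ (bits - 1).toNat) ∨ number > 2 ^ (bits - 1).toNat - 1 then "e1"
  else
    let d : List Char := bfmt (PySem.Int.mod number (2 ^ bits.toNat)).toNat
    String.mk (List.replicate (bits.toNat - d.length) '0' ++ d)

-- ===== PRECONDITION & SPEC =====
def Spec_sext (number : Int) (bits : Int) (out : String) : Prop := out = sext_alt number bits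
instance (number : Int) (bits : Int) (out : String) : Decidable (Spec_sext number bits out) := by unfold Spec_sext; infer_instance

-- ===== CLAIM (what is proved, stated in full; the proofs are below) =====
def Claim_equal_sext : Prop := ∀ (number : Int) (bits : Int), Dom_sext number bits → Spec_sext number bits (sext number bits)

-- ===== LEMMAS AND PROOFS =====

-- LSB-first binary digit list (proof-side reference)
def lsb (n : Nat) : List Char :=
  if n = 0 then [] else (if n % 2 = 1 then '1' else '0') :: lsb (n / 2)

def flipc (c : Char) : Char := if c = '1' then '0' else '1'

-- non-accumulator form of tcLoop
def tc : List Char → List Char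
  | [] => []
  | c :: r => if c = '1' then c :: r.map flipc else c :: tc r

def padE (k : Nat) (l : List Char) : List Char := l ++ List.replicate (k - l.length) '0'

theorem lsb_zero : lsb 0 = [] := by rw [lsb]; simp

theorem sextDigits_eq (n : Nat) : ∀ acc, sextDigits n acc = acc ++ lsb n := by
  induction n using Nat.strong_induction_on with
  | _ n ih =>
    intro acc
    rw [sextDigits, lsb]
    by_cases h : n = 0
    · simp [h]
    · simp only [h, if_false]
      rw [ih (n / 2) (Nat.div_lt_self (Nat.pos_of_ne_zero h) one_lt_two)]
      simp

theorem bfmt_eq (n : Nat) (hn : n ≠ 0) : bfmt n = (lsb n).reverse := by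
  induction n using Nat.strong_induction_on with
  | _ n ih =>
    rw [bfmt, lsb]
    by_cases h2 : n < 2
    · interval_cases n
      · omega
      · simp [lsb]
    · simp only [h2, if_false, show n ≠ 0 by omega, if_false]
      rw [ih (n / 2) (by omega) (by omega)]
      simp

theorem lsb_len_le {k n : Nat} (h : n < 2 ^ k) : (lsb n).length ≤ k := by
  induction k generalizing n with
  | zero => rw [lsb]; simp [show n = 0 by omega]
  | succ k ih =>
    rw [lsb]
    by_cases h0 : n = 0
    · simp [h0]
    · simp only [h0, if_false, List.length_cons]
      have : n / 2 < 2 ^ k := by omega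
      have := ih this
      omega

theorem tcLoop_eq (l : List Char) : ∀ flag acc,
    tcLoop l flag acc = acc ++ (if flag then l.map flipc else tc l) := by
  induction l with
  | nil => intro flag acc; simp [tcLoop, tc]
  | cons c r ih =>
    intro flag acc
    cases flag with
    | true => simp [tcLoop, ih, flipc, List.map_cons]
    | false =>
      by_cases hc : c = '1' <;> simp [tcLoop, ih, tc, hc]

theorem padE_even (k t : Nat) : padE (k + 1) (lsb (2 * t)) = '0' :: padE k (lsb t) := by
  by_cases h0 : t = 0
  · subst h0; rw [show lsb 0 = [] from by rw [lsb]; simp]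
    simp [padE, List.replicate_succ]
  · rw [show lsb (2 * t) = '0' :: lsb t by
      rw [lsb]; simp only [show 2 * t ≠ 0 by omega, if_false]
      rw [show 2 * t % 2 = 0 by omega, show 2 * t / 2 = t by omega]; simp]
    simp [padE, Nat.succ_sub_succ]

theorem padE_odd (k t : Nat) : padE (k + 1) (lsb (2 * t + 1)) = '1' :: padE k (lsb t) := by
  rw [show lsb (2 * t + 1) = '1' :: lsb t by
    rw [lsb]; simp only [show 2 * t + 1 ≠ 0 by omega, if_false]
    rw [show (2 * t + 1) % 2 = 1 by omega, show (2 * t + 1) / 2 = t by omega]; simp]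
  simp [padE, Nat.succ_sub_succ]

theorem flip_padE (k : Nat) : ∀ m, m < 2 ^ k →
    (padE k (lsb m)).map flipc = padE k (lsb (2 ^ k - 1 - m)) := by
  induction k with
  | zero =>
    intro m hm
    rw [show m = 0 by omega, lsb_zero]
    simp [padE, lsb_zero]
  | succ k ih =>
    intro m hm
    rcases Nat.even_or_odd m with ⟨t, ht⟩ | ⟨t, ht⟩
    · rw [show m = 2 * t by omega] at hm ⊢
      rw [padE_even]
      rw [show 2 ^ (k + 1) - 1 - 2 * t = 2 * (2 ^ k - 1 - t) + 1 by
        have : 2 ^ (k + 1) = 2 * 2 ^ k := by ring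
        omega, padE_odd]
      simp only [List.map_cons]
      rw [ih t (by omega)]
      simp [flipc]
    · rw [show m = 2 * t + 1 by omega] at hm ⊢
      rw [padE_odd]
      rw [show 2 ^ (k + 1) - 1 - (2 * t + 1) = 2 * (2 ^ k - 1 - t) by
        have : 2 ^ (k + 1) = 2 * 2 ^ k := by ring
        omega, padE_even]
      simp only [List.map_cons]
      rw [ih t (by omega)]
      simp [flipc]

theorem tc_padE (k : Nat) : ∀ m, 0 < m → m < 2 ^ k →
    tc (padE k (lsb m)) = padE k (lsb (2 ^ k - m)) := by
  induction k with
  | zero => intro m h1 h2; omega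
  | succ k ih =>
    intro m h1 h2
    have h2k : 2 ^ (k + 1) = 2 * 2 ^ k := by ring
    rcases Nat.even_or_odd m with ⟨t, ht⟩ | ⟨t, ht⟩
    · have ht' : m = 2 * t := by omega
      subst ht'
      rw [padE_even, show 2 ^ (k + 1) - 2 * t = 2 * (2 ^ k - t) by omega, padE_even]
      rw [tc]
      simp only [show ('0' : Char) ≠ '1' by decide, if_false]
      rw [ih t (by omega) (by omega)]
    · have ht' : m = 2 * t + 1 := by omega
      subst ht'
      rw [padE_odd, show 2 ^ (k + 1) - (2 * t + 1) = 2 * (2 ^ k - 1 - t) + 1 by omega, padE_odd]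
      rw [tc, flip_padE k t (by omega)]
      simp

theorem padE_reverse (k : Nat) (l : List Char) :
    (padE k l).reverse = List.replicate (k - l.length) '0' ++ l.reverse := by
  simp [padE, List.reverse_append]

-- ===== VERDICT (by name: the statement is the Claim_ definition above) =====
theorem sext_spec : Claim_equal_sext := by
  intro number bits _
  unfold Spec_sext sext sext_alt
  by_cases hb : bits < 1
  · simp [hb]
  · by_cases hc : number < -(2 ^ (bits - 1).toNat) ∨ number > 2 ^ (bits - 1).toNat - 1
    · rw [if_neg hb, if_pos hc, if_pos (Or.inr hc)]
    · have hB : ¬(bits < 1 ∨ number < -(2 ^ (bits - 1).toNat) ∨ number > 2 ^ (bits - 1).toNat - 1) := by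
        tauto
      rw [if_neg hb, if_neg hc, if_neg hB]
      push_neg at hc
      obtain ⟨hlo, hhi⟩ := hc
      set K : Nat := bits.toNat with hK
      have hK1 : 1 ≤ K := by omega
      have hKm : (bits - 1).toNat = K - 1 := by omega
      have hpow : (2 : Int) ^ (K - 1) = ((2 ^ (K - 1) : Nat) : Int) := by push_cast; ring
      have h2K : (2 : Nat) ^ K = 2 * 2 ^ (K - 1) := by
        rw [← pow_succ', Nat.sub_add_cancel hK1]
      have hpowK : ((2 : Int) ^ K) = ((2 ^ K : Nat) : Int) := by push_cast; ring
      rw [hKm, hpow] at hlo hhi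
      by_cases hneg : number < 0
      · -- negative case: two's complement
        set m : Nat := (-number).toNat with hm
        have hm1 : 1 ≤ m := by omega
        have hmle : m ≤ 2 ^ (K - 1) := by omega
        have hmlt : m < 2 ^ K := by omega
        set v : Nat := 2 ^ K - m with hv
        have hv1 : 1 ≤ v := by omega
        have hvlt : v < 2 ^ K := by omega
        have hmod : PySem.Int.mod number (2 ^ K) = ((v : Nat) : Int) := by
          rw [PySem.Int.mod_eq_emod_of_pos (by positivity), hpowK,
            ← Int.add_emod_right number (((2 ^ K : Nat) : Int)),
            Int.emod_eq_of_lt (by omega) (by omega)]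
          omega
        have hlenm : (lsb m).length ≤ K := lsb_len_le hmlt
        have hlenv : (lsb v).length ≤ K := lsb_len_le hvlt
        simp only [hneg, if_true, hmod, sextDigits_eq, List.nil_append,
          Int.toNat_natCast, bfmt_eq v (by omega), List.length_reverse,
          List.reverse_append, List.reverse_reverse, List.reverse_replicate]
        rw [show (bits - ((lsb m).length : Int)).toNat = K - (lsb m).length by omega]
        rw [tcLoop_eq]
        simp only [Bool.false_eq_true, if_false, List.nil_append]
        rw [show lsb m ++ List.replicate (K - (lsb m).length) '0' = padE K (lsb m) from rfl]
        rw [tc_padE K m (by omega) hmlt, ← hv, padE_reverse]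
      · -- nonnegative case
        have hn0 : 0 ≤ number := by omega
        set n : Nat := number.toNat with hn
        have hnlt : n < 2 ^ K := by omega
        have hmod : PySem.Int.mod number (2 ^ K) = ((n : Nat) : Int) := by
          rw [PySem.Int.mod_eq_emod_of_pos (by positivity), hpowK,
            Int.emod_eq_of_lt hn0 (by omega)]
          omega
        have hlenn : (lsb n).length ≤ K := lsb_len_le hnlt
        simp only [hneg, if_false, if_neg (by decide : ¬((1:Int) = -1)), hmod,
          sextDigits_eq, List.nil_append, Int.toNat_natCast, List.length_reverse]
        rw [show (bits - ((lsb n).length : Int)).toNat = K - (lsb n).length by omega]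
        by_cases hz : n = 0
        · rw [hz, lsb_zero]
          simp only [List.length_nil, Nat.sub_zero, List.reverse_nil, List.append_nil]
          rw [show bfmt 0 = ['0'] from by rw [bfmt]; norm_num]
          simp only [List.length_cons, List.length_nil]
          rw [show K = (K - 1) + 1 by omega, List.replicate_succ']
          simp
        · rw [bfmt_eq n hz]
          simp
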